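-- pv_equiv track=rewrite | github.com/xapi-project/sm | libs/sm/core/util.py | splitXmlText
-- ===== SOURCE A (Python) =====
-- DEFAULT_SEGMENT_LEN = 950
--
-- def splitXmlText(xmlData, segmentLen=DEFAULT_SEGMENT_LEN, showContd=False):
--     """
--     Split xml string data into substrings small enough for the
--     syslog line length limit. Split at tag end markers ( ">" ).
--     Usage:
--         strList = []
--         strList = splitXmlText( longXmlText, maxLineLen )   # maxLineLen is optional
--     """
--     remainingData = str(xmlData)
--
--     # "Un-pretty-print"
--     remainingData = remainingData.replace('\n', '')
--     remainingData = remainingData.replace('\t', '')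
--
--     remainingChars = len(remainingData)
--     returnData = ''
--
--     thisLineNum = 0
--     while remainingChars > segmentLen:
--         thisLineNum = thisLineNum + 1
--         index = segmentLen
--         tmpStr = remainingData[:segmentLen]
--         tmpIndex = tmpStr.rfind('>')
--         if tmpIndex != -1:
--             index = tmpIndex + 1
--
--         tmpStr = tmpStr[:index]
--         remainingData = remainingData[index:]
--         remainingChars = len(remainingData)
--
--         if showContd:
--             if thisLineNum != 1:
--                 tmpStr = '(Cont\'d): ' + tmpStr
--             tmpStr = tmpStr + ' (Cont\'d):'
--
--         returnData += tmpStr + '\n'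
--
--     if showContd and thisLineNum > 0:
--         remainingData = '(Cont\'d): ' + remainingData
--     returnData += remainingData
--
--     return returnData
-- ===== SOURCE B (Python) =====
-- DEFAULT_SEGMENT_LEN = 950
--
-- def splitXmlText(xmlData, segmentLen=DEFAULT_SEGMENT_LEN, showContd=False):
--     """
--     Split xml string data into substrings small enough for the syslog line
--     length limit, splitting at '>' where possible.  One pass over an index
--     into the string (no repeated re-slicing of the remainder), pieces
--     collected and decorated afterwards, then joined once.
--     """
--     data = str(xmlData).replace('\n', '').replace('\t', '')
--     pieces = []
--     pos = 0
--     while len(data) - pos > segmentLen: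
--         cut = data.rfind('>', pos, pos + segmentLen)
--         end = cut + 1 if cut != -1 else pos + segmentLen
--         pieces.append(data[pos:end])
--         pos = end
--     tail = data[pos:]
--     if showContd and pieces:
--         pieces = [("(Cont'd): " if i else '') + p + " (Cont'd):"
--                   for i, p in enumerate(pieces)]
--         tail = "(Cont'd): " + tail
--     return ''.join(p + '\n' for p in pieces) + tail
-- ===== Notes on version B (the rewrite author's own statement) =====
-- stated objective: faster
-- what changed: B keeps a single position index into the stripped string and uses rfind with explicit bounds on each fixed window, collecting undecorated pieces and decorating/joining them once at the end, instead of A's loop that re-slices and copies the whole remaining string and rebuilds the accumulated output string every iteration; Pre_ excludes only segmentLen <= 0 with a nonempty stripped string, where A loops forever.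
import Mathlib
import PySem

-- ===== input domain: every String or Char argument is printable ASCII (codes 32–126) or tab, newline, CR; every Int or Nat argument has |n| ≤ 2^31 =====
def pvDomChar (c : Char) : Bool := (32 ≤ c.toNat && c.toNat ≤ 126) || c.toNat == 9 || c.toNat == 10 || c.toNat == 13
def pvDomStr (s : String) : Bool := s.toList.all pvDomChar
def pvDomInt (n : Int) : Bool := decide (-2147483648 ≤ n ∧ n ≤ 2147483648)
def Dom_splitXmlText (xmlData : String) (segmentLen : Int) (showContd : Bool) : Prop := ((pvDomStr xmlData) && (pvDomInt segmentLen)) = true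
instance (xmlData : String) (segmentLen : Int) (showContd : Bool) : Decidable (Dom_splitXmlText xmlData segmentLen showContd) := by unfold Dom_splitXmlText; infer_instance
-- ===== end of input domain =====

-- B replaces A's repeated re-slicing of the remaining string (and repeated string
-- concatenation of the output) by a single position index, a bounded rfind per
-- window, and one decorate-and-join pass at the end, avoiding the repeated copying.

def contd1 : List Char := ['(', 'C', 'o', 'n', 't', '\'', 'd', ')', ':', ' ']   -- "(Cont'd): "
def contd2 : List Char := [' ', '(', 'C', 'o', 'n', 't', '\'', 'd', ')', ':']   -- " (Cont'd):"

-- ===== PORT A =====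
-- A's while loop; the fuel argument only makes the recursion structural: with the
-- initial fuel = length + 1 it is never exhausted on inputs satisfying Pre_
-- (each iteration consumes index ≥ 1 characters); the Python loops forever
-- exactly on the inputs Pre_ excludes.
def aLoop (L : Int) (c : Bool) : Nat → List Char → Int → List Char → List Char
  | 0, rem, ln, acc => acc ++ (if c = true ∧ 0 < ln then contd1 ++ rem else rem)
  | fuel+1, rem, ln, acc =>
    if (rem.length : Int) > L then                                -- while remainingChars > segmentLen
      let ln' := ln + 1                                           -- thisLineNum = thisLineNum + 1
      let tmp0 := PySem.List.slice rem none (some L)              -- tmpStr = remainingData[:segmentLen]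
      let ti := PySem.Chars.rfind tmp0 ['>']                      -- tmpIndex = tmpStr.rfind('>')
      let idx := if ti ≠ -1 then ti + 1 else L                    -- index
      let tmp1 := PySem.List.slice tmp0 none (some idx)           -- tmpStr = tmpStr[:index]
      let rem' := PySem.List.slice rem (some idx) none            -- remainingData = remainingData[index:]
      let tmp2 := if c = true then (if ln' ≠ 1 then contd1 ++ tmp1 else tmp1) ++ contd2 else tmp1
      aLoop L c fuel rem' ln' (acc ++ tmp2 ++ ['\n'])             -- returnData += tmpStr + '\n'
    else
      acc ++ (if c = true ∧ 0 < ln then contd1 ++ rem else rem)   -- epilogue; returnData += remainingData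

def splitXmlText (xmlData : String) (segmentLen : Int) (showContd : Bool) : String :=
  let rem := ((PySem.Str.replace (PySem.Str.replace xmlData "\n" "") "\t" "")).toList
  String.ofList (aLoop segmentLen showContd (rem.length + 1) rem 0 [])

-- ===== PORT B =====
-- B's while loop over a position index (same fuel guard, for the same reason).
def bLoop (L : Int) (s : List Char) : Nat → Int → List (List Char) → List (List Char) × Int
  | 0, pos, ps => (ps, pos)
  | fuel+1, pos, ps =>
    if (s.length : Int) - pos > L then                                -- while len(data) - pos > segmentLen
      let cut := PySem.Chars.rfindFrom s ['>'] pos (some (pos + L))   -- data.rfind('>', pos, pos + segmentLen)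
      let e := if cut ≠ -1 then cut + 1 else pos + L
      bLoop L s fuel e (ps ++ [PySem.List.slice s (some pos) (some e)])
    else (ps, pos)

def splitXmlText_alt (xmlData : String) (segmentLen : Int) (showContd : Bool) : String :=
  let data := ((PySem.Str.replace (PySem.Str.replace xmlData "\n" "") "\t" "")).toList
  let r := bLoop segmentLen data (data.length + 1) 0 []
  let tail := PySem.List.slice data (some r.2) none
  let pieces := if showContd = true ∧ r.1 ≠ [] then
      (PySem.List.enumerate r.1).map (fun ip => (if ip.1 ≠ 0 then contd1 else []) ++ (ip.2 ++ contd2))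
    else r.1
  let tail' := if showContd = true ∧ r.1 ≠ [] then contd1 ++ tail else tail
  String.ofList (pieces.foldl (fun a p => a ++ p ++ ['\n']) [] ++ tail')

-- ===== PRECONDITION & SPEC =====
-- Pre_ excludes exactly the inputs on which the Python A never returns: with
-- segmentLen ≤ 0 and the string (stripped of '\n'/'\t') longer than segmentLen,
-- A's while loop makes no progress and spins forever.  A returns on every other input.
def Pre_splitXmlText (xmlData : String) (segmentLen : Int) (showContd : Bool) : Prop :=
  1 ≤ segmentLen ∨
    ((xmlData.toList.filter (fun ch => ch ≠ '\t' ∧ ch ≠ '\n')).length : Int) ≤ segmentLen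

instance (xmlData : String) (segmentLen : Int) (showContd : Bool) : Decidable (Pre_splitXmlText xmlData segmentLen showContd) := by
  unfold Pre_splitXmlText; infer_instance

def pvWitness_splitXmlText : String × Int × Bool := ("<a><b>hi</b></a>", 5, true)

def Spec_splitXmlText (xmlData : String) (segmentLen : Int) (showContd : Bool) (out : String) : Prop := out = splitXmlText_alt xmlData segmentLen showContd
instance (xmlData : String) (segmentLen : Int) (showContd : Bool) (out : String) : Decidable (Spec_splitXmlText xmlData segmentLen showContd out) := by unfold Spec_splitXmlText; infer_instance

-- ===== CLAIM (what is proved, stated in full; the proofs are below) =====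
def Claim_equal_splitXmlText : Prop := ∀ (xmlData : String) (segmentLen : Int) (showContd : Bool), Dom_splitXmlText xmlData segmentLen showContd → Pre_splitXmlText xmlData segmentLen showContd → Spec_splitXmlText xmlData segmentLen showContd (splitXmlText xmlData segmentLen showContd)

-- ===== LEMMAS AND PROOFS =====

def render (c : Bool) (first : Bool) : List (List Char) → List Char → List Char
  | [], tail => if c && !first then contd1 ++ tail else tail
  | p :: ps, tail =>
      (if c = true then (if !first then contd1 ++ p else p) ++ contd2 else p) ++ '\n' :: render c false ps tail

lemma render_cons (c first : Bool) (p : List Char) (ps : List (List Char)) (tail : List Char) :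
    render c first (p :: ps) tail
      = (if c = true then (if !first then contd1 ++ p else p) ++ contd2 else p) ++ '\n' :: render c false ps tail := rfl

lemma bLoop_acc (L : Int) (s : List Char) :
    ∀ fuel (pos : Int) (ps : List (List Char)),
      bLoop L s fuel pos ps = (ps ++ (bLoop L s fuel pos []).1, (bLoop L s fuel pos []).2) := by
  intro fuel
  induction fuel with
  | zero => intro pos ps; simp [bLoop]
  | succ f ih =>
    intro pos ps
    simp only [bLoop]
    split
    · simp only [List.nil_append]
      rw [ih _ (ps ++ [_]), ih _ [_]]
      simp
    · simp

lemma rfind_go_bounds (s sub : List Char) (hsub : sub ≠ []) :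
    ∀ j, PySem.Chars.rfind.go s sub j = -1 ∨
      (0 ≤ PySem.Chars.rfind.go s sub j ∧ (PySem.Chars.rfind.go s sub j).toNat < s.length) := by
  intro j
  induction j with
  | zero =>
    simp only [PySem.Chars.rfind.go]
    split
    · right
      refine ⟨le_refl _, ?_⟩
      rename_i h
      have hp := List.isPrefixOf_iff_prefix.mp h
      have : 0 < s.length := by
        cases s with
        | nil => cases sub <;> simp_all
        | cons a t => simp
      simpa using this
    · left; rfl
  | succ j ih =>
    simp only [PySem.Chars.rfind.go]
    split
    · right
      rename_i h
      have hp := List.isPrefixOf_iff_prefix.mp h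
      have hlen : 0 < (s.drop (j+1)).length := by
        cases hd : s.drop (j+1) with
        | nil => rw [hd] at hp; cases sub <;> simp_all
        | cons a t => simp
      have : j + 1 < s.length := by
        rw [List.length_drop] at hlen; omega
      constructor
      · positivity
      · simpa using this
    · exact ih

lemma loop_inv (L : Int) (hL : 1 ≤ L) (c : Bool) (s : List Char) :
    ∀ fuel (pos : Nat), pos ≤ s.length → ∀ (ln : Int), 0 ≤ ln → ∀ acc,
      aLoop L c fuel (s.drop pos) ln acc
        = acc ++ render c (decide (ln = 0)) (bLoop L s fuel (pos : Int) []).1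
            (PySem.List.slice s (some (bLoop L s fuel (pos : Int) []).2) none) := by
  intro fuel
  induction fuel with
  | zero =>
    intro pos hpos ln hln acc
    simp only [aLoop, bLoop, render, PySem.List.slice_from_natCast]
    by_cases h0 : ln = 0
    · simp [h0]
    · have hlt : 0 < ln := by omega
      cases c <;> simp [h0, hlt]
  | succ fuel ih =>
    intro pos hpos ln hln acc
    have hremlen : ((s.drop pos).length : Int) = (s.length : Int) - pos := by
      simp [List.length_drop]; omega
    by_cases hcond : (s.length : Int) - (pos : Int) > L
    · -- loop body runs on both sides
      have hcondA : (((s.drop pos).length : Int) > L) := by rw [hremlen]; exact hcond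
      have hL0 : (0:Int) ≤ L := by omega
      have hLlen : L.toNat ≤ (s.drop pos).length := by
        simp only [List.length_drop]; omega
      -- the shared window
      set rem := s.drop pos with hrem
      have htmp0 : PySem.List.slice rem none (some L) = rem.take L.toNat :=
        PySem.List.slice_to rem hL0
      have hwinlen : (rem.take L.toNat).length = L.toNat := by
        simp [List.length_take]; omega
      have hwin : List.drop ((pos:Int)).toNat (List.take (((pos:Int) + L)).toNat s) = rem.take L.toNat := by
        rw [List.drop_take]
        congr 1
        omega
      have hposL : (pos : Int) + L < (s.length : Int) := by omega
      have hrfindFrom : PySem.Chars.rfindFrom s ['>'] (pos : Int) (some ((pos:Int) + L))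
          = if PySem.Chars.rfind (rem.take L.toNat) ['>'] = -1 then -1
            else (pos : Int) + PySem.Chars.rfind (rem.take L.toNat) ['>'] := by
        have h1 : ¬ ((s.length : Int) < (pos : Int) + L) := by omega
        have h2 : ¬ ((pos : Int) + L < (0:Int)) := by omega
        have h3 : ¬ ((pos : Int) < (0:Int)) := by omega
        have h4 : ¬ ((pos : Int) + L < (pos : Int)) := by omega
        simp only [PySem.Chars.rfindFrom, h1, h2, h3, h4, if_false, hwin]
      -- unfold one step of both loops
      conv_lhs => rw [aLoop]
      conv_rhs => rw [bLoop]
      rw [if_pos hcondA, if_pos hcond]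
      dsimp only
      rw [htmp0, hrfindFrom]
      generalize hgen : PySem.Chars.rfind (rem.take L.toNat) ['>'] = r
      -- bounds for r
      have hrb := rfind_go_bounds (rem.take L.toNat) ['>'] (by simp) (rem.take L.toNat).length
      rw [← PySem.Chars.rfind, hgen, hwinlen] at hrb
      -- the cut index k (= A's "index", B's "end - pos")
      obtain ⟨k, hk1, hkL, hidx, hE⟩ :
          ∃ k : Nat, 1 ≤ k ∧ k ≤ L.toNat ∧
            (if r ≠ -1 then r + 1 else L) = (k : Int) ∧
            (if (if r = -1 then (-1:Int) else (pos : Int) + r) ≠ -1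
              then (if r = -1 then (-1:Int) else (pos : Int) + r) + 1
              else (pos:Int) + L) = ((pos + k : Nat) : Int) := by
        rcases hrb with h1 | ⟨h2, h3⟩
        · refine ⟨L.toNat, by omega, le_refl _, ?_, ?_⟩
          · rw [if_neg (by omega)]; omega
          · rw [if_pos h1, if_neg (by omega)]; push_cast; omega
        · have hrne : r ≠ -1 := by omega
          refine ⟨r.toNat + 1, by omega, by omega, ?_, ?_⟩
          · rw [if_pos hrne]; push_cast; omega
          · rw [if_neg hrne, if_pos (by omega : ((pos:Int) + r) ≠ -1)]; push_cast; omega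
      rw [hidx, hE]
      -- the slices in terms of take/drop
      have hpk : pos + k ≤ s.length := by omega
      have htmp1 : PySem.List.slice (rem.take L.toNat) none (some (k:Int)) = rem.take k := by
        rw [PySem.List.slice_to _ (by positivity), Int.toNat_natCast, List.take_take,
          min_eq_left hkL]
      have hrem' : PySem.List.slice rem (some (k:Int)) none = s.drop (pos + k) := by
        rw [PySem.List.slice_from_natCast, hrem, List.drop_drop]
      have hpiece : PySem.List.slice s (some ((pos:Int))) (some ((pos + k : Nat):Int)) = rem.take k := by
        have hc : ((pos + k : Nat) : Int) = ((pos:Int)) + ((k:Int)) := by push_cast; ring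
        rw [hc, PySem.List.slice_natCast_add, hrem]
      rw [htmp1, hrem', hpiece]
      -- one step of the accumulator lemma on the B side
      simp only [List.nil_append]
      rw [bLoop_acc L s fuel _ [rem.take k]]
      -- induction hypothesis at pos + k
      rw [ih (pos + k) hpk (ln + 1) (by omega)]
      -- assemble: A's inline decoration is render's head
      dsimp only
      simp only [List.singleton_append]
      rw [render_cons]
      have hln1 : (decide (ln + 1 = 0)) = false := by simp; omega
      rw [hln1]
      by_cases h0 : ln = 0
      · cases c <;> simp [h0]
      · have h1 : ln + 1 ≠ 1 := by omega
        cases c <;> simp [h0, h1]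
    · -- loop exits on both sides
      have hcondA : ¬(((s.drop pos).length : Int) > L) := by rw [hremlen]; exact hcond
      simp only [aLoop, bLoop, if_neg hcondA, if_neg hcond, render,
        PySem.List.slice_from_natCast]
      by_cases h0 : ln = 0
      · simp [h0]
      · have hlt : 0 < ln := by omega
        cases c <;> simp [h0, hlt]
lemma replace_go_single (ch : Char) :
    ∀ (l : List Char) (fuel : Nat), l.length ≤ fuel → ∀ (acc : List Char),
      PySem.Chars.replace.go [ch] [] fuel l acc = acc.reverse ++ l.filter (fun x => x ≠ ch) := by
  intro l
  induction l with
  | nil =>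
    intro fuel _ acc
    cases fuel <;> simp [PySem.Chars.replace.go]
  | cons c t ih =>
    intro fuel hf acc
    cases fuel with
    | zero => simp at hf
    | succ f =>
      simp only [List.length_cons] at hf
      simp only [PySem.Chars.replace.go]
      by_cases hc : c = ch
      · subst hc
        have hpre : [c].isPrefixOf (c :: t) = true := by simp [List.isPrefixOf]
        rw [if_pos hpre]
        simp only [List.length_cons, List.length_nil, List.drop_succ_cons, List.drop_zero,
          List.reverse_nil, List.nil_append]
        rw [ih f (by omega) acc]
        simp
      · have hpre : [ch].isPrefixOf (c :: t) = false := by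
          simp [List.isPrefixOf]
          exact fun h => hc h.symm
        rw [if_neg (by simp [hpre])]
        rw [ih f (by omega) (c :: acc)]
        simp [hc]

lemma replace_single_empty (ch : Char) (l : List Char) :
    PySem.Chars.replace l [ch] [] = l.filter (fun x => x ≠ ch) := by
  rw [PySem.Chars.replace]
  simp only [List.isEmpty_cons, Bool.false_eq_true, if_false]
  rw [replace_go_single ch l l.length (le_refl _) []]
  simp

lemma joinNl (ps : List (List Char)) (acc : List Char) :
    ps.foldl (fun a p => a ++ p ++ ['\n']) acc = acc ++ ps.flatMap (fun p => p ++ ['\n']) := by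
  simp only [List.append_assoc]
  exact PySem.List.foldl_append_eq_flatMap (fun p => p ++ ['\n']) ps acc

lemma render_false (first : Bool) (ps : List (List Char)) (tail : List Char) :
    render false first ps tail = ps.flatMap (fun p => p ++ ['\n']) ++ tail := by
  induction ps generalizing first with
  | nil => simp [render]
  | cons p t ih => simp [render, ih]

lemma render_true_from (ps : List (List Char)) (tail : List Char) :
    ∀ k : Int, 1 ≤ k →
    ((PySem.List.enumerate ps k).map (fun ip => (if ip.1 = 0 then [] else contd1) ++ (ip.2 ++ contd2))).flatMap
        (fun p => p ++ ['\n']) ++ (contd1 ++ tail)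
      = render true false ps tail := by
  induction ps with
  | nil => intro k hk; simp [render, PySem.List.enumerate_nil]
  | cons p t ih =>
    intro k hk
    rw [PySem.List.enumerate_cons]
    simp only [List.map_cons, List.flatMap_cons]
    rw [List.append_assoc, ih (k+1) (by omega)]
    have hk0 : ¬ (k = 0) := by omega
    simp [render, hk0]

lemma renderB (c : Bool) (ps : List (List Char)) (tail : List Char) :
    (List.foldl (fun a p => a ++ p ++ ['\n']) []
        (if c = true ∧ ps ≠ [] then
          (PySem.List.enumerate ps).map (fun ip => (if ip.1 ≠ 0 then contd1 else []) ++ (ip.2 ++ contd2))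
        else ps)) ++
      (if c = true ∧ ps ≠ [] then contd1 ++ tail else tail)
    = render c true ps tail := by
  cases c with
  | false =>
    simp only [false_and, if_false, Bool.false_eq_true]
    rw [joinNl]
    simp [render_false]
  | true =>
    cases ps with
    | nil => simp [render]
    | cons p t =>
      simp only [true_and, ne_eq, reduceCtorEq, not_false_iff, if_pos]
      rw [joinNl]
      simp only [List.nil_append]
      rw [PySem.List.enumerate_cons]
      simp only [List.map_cons, List.flatMap_cons]
      rw [List.append_assoc]
      norm_num
      rw [render_true_from t tail 1 (le_refl _)]
      simp [render]

theorem splitXmlText_spec : Claim_equal_splitXmlText := by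
  intro x L c _ hpre
  unfold Spec_splitXmlText splitXmlText splitXmlText_alt
  dsimp only
  set s := ((PySem.Str.replace (PySem.Str.replace x "\n" "") "\t" "")).toList with hs
  by_cases hL : 1 ≤ L
  · have hinv := loop_inv L hL c s (s.length + 1) 0 (Nat.zero_le _) 0 (le_refl _) []
    simp only [List.drop_zero, Nat.cast_zero, decide_true] at hinv
    rw [hinv, renderB]
    simp
  · -- Pre_ forces segmentLen = 0 and an empty stripped string: both loops exit at once
    have hfil : s = x.toList.filter (fun ch => ch ≠ '\t' ∧ ch ≠ '\n') := by
      rw [hs, PySem.Str.toList_replace, PySem.Str.toList_replace]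
      have h1 : ("\n" : String).toList = ['\n'] := rfl
      have h2 : ("\t" : String).toList = ['\t'] := rfl
      have h3 : ("" : String).toList = [] := rfl
      rw [h1, h2, h3, replace_single_empty, replace_single_empty, List.filter_filter]
      simp
    rcases hpre with hp | hp
    · omega
    · have hs0 : (x.toList.filter (fun ch => ch ≠ '\t' ∧ ch ≠ '\n')).length = 0 := by omega
      have hsnil : s = [] := by rw [hfil]; exact List.length_eq_zero_iff.mp hs0
      have hngt : ¬((0:Int) > L) := by omega
      rw [hsnil]
      simp [aLoop, bLoop, hngt, PySem.List.slice, PySem.List.clampIdx]
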